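-- pv_equiv track=rewrite | github.com/nickyiliwang/ds_algo | 101.graph-valid-tree.py | validTree
-- ===== SOURCE A (Python) =====
-- def validTree(n: int, edges) -> bool:
--     # KEY here is to check this
--     if len(edges) < n-1:
--         return False
--
--     parent = [i for i in range(n + 1)]
--     rank = [i for i in range(n + 1)]
--
--     def find(i):
--         if parent[i] == i:
--             return i
--         else:
--             return find(parent[i])
--
--     def union(x, y):
--         pX, pY = find(x), find(y)
--
--         if pX == pY:
--             return False
--
--         if rank[pX] > rank[pY]:
--             parent[pX] = parent[pY]
--         else:
--             parent[pX] = parent[pY]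
--             rank[pY] += rank[pX]
--
--         return True
--
--     for x, y in edges:
--         if union(x, y) == False:
--             return False
--
--     return True
-- ===== SOURCE B (Python) =====
-- def validTree(n: int, edges) -> bool:
--     if len(edges) < n - 1:
--         return False
--
--     # flat partition: rep[i] is directly the representative of node i
--     rep = list(range(n + 1))
--
--     for x, y in edges:
--         rx, ry = rep[x], rep[y]
--         if rx == ry:
--             return False
--         rep = [ry if v == rx else v for v in rep]
--
--     return True
-- ===== Notes on version B (the rewrite author's own statement) =====
-- stated objective: alternative
-- what changed: Replaces the recursive parent-forest union-find (and its dead rank bookkeeping) with a flat representative array: finding a component is a single lookup and a union relabels the absorbed class in one linear pass, no recursion and no rank list.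
-- outside the precondition, e.g. on validTree(2, [[0, 0], [5, 5]]): A returns False, B returns False; on validTree(2, [[0, 0], [1]]): A returns False, B returns False
import Mathlib
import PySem

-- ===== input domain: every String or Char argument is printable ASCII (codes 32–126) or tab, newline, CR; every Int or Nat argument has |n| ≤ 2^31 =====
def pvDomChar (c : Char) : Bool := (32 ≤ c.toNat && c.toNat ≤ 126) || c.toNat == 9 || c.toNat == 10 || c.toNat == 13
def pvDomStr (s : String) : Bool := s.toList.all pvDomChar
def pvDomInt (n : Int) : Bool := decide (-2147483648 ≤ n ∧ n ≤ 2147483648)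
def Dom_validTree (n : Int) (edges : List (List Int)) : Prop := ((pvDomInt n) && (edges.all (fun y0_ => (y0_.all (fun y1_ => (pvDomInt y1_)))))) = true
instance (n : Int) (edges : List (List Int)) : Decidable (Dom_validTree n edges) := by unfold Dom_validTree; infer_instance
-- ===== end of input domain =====

-- B replaces the recursive parent-forest union-find by a flat representative array
-- (one lookup per find, one linear relabel pass per union); objective: alternative
-- (same worst-case cost, no recursion, no rank list).

-- ===== PORT A =====

-- find(i): recursive chase of parent pointers; fuel (length+1) is proved sufficient
-- on every state A reaches from a Pre_ input (none = IndexError or fuel exhausted).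
def pvFindA (parent : List Int) : Nat → Int → Option Int
  | 0, _ => none
  | f + 1, i =>
    match PySem.List.pyGet? parent i with
    | none => none
    | some p => if p = i then some i else pvFindA parent f p

-- union(x, y): returns (result, parent, rank) after the mutations; none = IndexError.
def pvUnionA (parent rank : List Int) (x y : Int) : Option (Bool × List Int × List Int) :=
  match pvFindA parent (parent.length + 1) x, pvFindA parent (parent.length + 1) y with
  | some pX, some pY =>
    if pX = pY then some (false, parent, rank)
    else
      match PySem.List.pyGet? rank pX, PySem.List.pyGet? rank pY, PySem.List.pyGet? parent pY with
      | some rX, some rY, some v =>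
        match PySem.List.pySet? parent pX v with
        | some parent' =>
          if rY < rX then some (true, parent', rank)
          else
            match PySem.List.pySet? rank pY (rY + rX) with
            | some rank' => some (true, parent', rank')
            | none => none
        | none => none
      | _, _, _ => none
  | _, _ => none

-- for x, y in edges: if union(x, y) == False: return False
def pvLoopA (parent rank : List Int) : List (List Int) → Option Bool
  | [] => some true
  | e :: rest =>
    match e with
    | [x, y] =>
      match pvUnionA parent rank x y with
      | some (b, parent', rank') => if b then pvLoopA parent' rank' rest else some false
      | none => none
    | _ => none
  -- non-pair e = ValueError on unpacking

def validTree (n : Int) (edges : List (List Int)) : Bool :=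
  if PySem.List.len edges < n - 1 then false
  else
    let parent := PySem.List.pyRange 0 (n + 1) 1
    let rank := PySem.List.pyRange 0 (n + 1) 1
    (pvLoopA parent rank edges).getD false

-- ===== PORT B =====

-- for x, y in edges: rx, ry = rep[x], rep[y]; cycle if equal, else relabel rx -> ry.
def pvLoopB (rep : List Int) : List (List Int) → Option Bool
  | [] => some true
  | e :: rest =>
    match e with
    | [x, y] =>
      match PySem.List.pyGet? rep x, PySem.List.pyGet? rep y with
      | some rx, some ry =>
        if rx = ry then some false
        else pvLoopB (rep.map fun v => if v = rx then ry else v) rest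
      | _, _ => none
    | _ => none

def validTree_alt (n : Int) (edges : List (List Int)) : Bool :=
  if PySem.List.len edges < n - 1 then false
  else (pvLoopB (PySem.List.pyRange 0 (n + 1) 1) edges).getD false

-- ===== PRECONDITION & SPEC =====
-- Pre_ admits every input with fewer than n-1 edges (both programs return False before
-- touching the edges) and otherwise excludes the inputs on which an edge is not an
-- [x, y] pair (ValueError on unpacking) or carries a value outside Python's index range
-- for the length-(n+1) parent list (IndexError); A raises on such inputs unless an
-- earlier edge already closed a cycle, in which case both programs return False before
-- reaching the bad edge (cites).
def Pre_validTree (n : Int) (edges : List (List Int)) : Prop :=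
  (edges.length : Int) < n - 1 ∨
    ∀ e ∈ edges, e.length = 2 ∧ ∀ v ∈ e, -(n + 1) ≤ v ∧ v ≤ n
instance (n : Int) (edges : List (List Int)) : Decidable (Pre_validTree n edges) := by
  unfold Pre_validTree; infer_instance

def pvWitness_validTree : Int × List (List Int) := (3, [[0, 1], [1, 2], [2, 3]])

def Spec_validTree (n : Int) (edges : List (List Int)) (out : Bool) : Prop := out = validTree_alt n edges
instance (n : Int) (edges : List (List Int)) (out : Bool) : Decidable (Spec_validTree n edges out) := by unfold Spec_validTree; infer_instance

-- ===== CLAIM (what is proved, stated in full; the proofs are below) =====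
def Claim_equal_validTree : Prop := ∀ (n : Int) (edges : List (List Int)), Dom_validTree n edges → Pre_validTree n edges → Spec_validTree n edges (validTree n edges)

-- ===== LEMMAS AND PROOFS =====

-- The invariant tying A's parent forest to B's flat representative array: same length,
-- entries in range, and a fuel bound k (= #known non-roots, an explicit Finset) such
-- that find with fuel k+1 returns exactly B's label, with k + 1 ≤ length.
def pvInv (parent rep : List Int) : Prop :=
  parent.length = rep.length ∧
  (∀ j, j < parent.length → 0 ≤ parent.getD j 0 ∧ parent.getD j 0 < (parent.length : Int)) ∧
  (∀ j, j < rep.length → 0 ≤ rep.getD j 0 ∧ rep.getD j 0 < (rep.length : Int)) ∧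
  ∃ (S : Finset Nat),
    (∀ j ∈ S, j < parent.length ∧ parent.getD j 0 ≠ (j : Int)) ∧
    S.card + 1 ≤ parent.length ∧
    ∀ j, j < parent.length → pvFindA parent (S.card + 1) (j : Int) = some (rep.getD j 0)

theorem pvFindA_mono (parent : List Int) (f : Nat) (i r : Int)
    (h : pvFindA parent f i = some r) : pvFindA parent (f + 1) i = some r := by
  induction f generalizing i with
  | zero => simp [pvFindA] at h
  | succ f ih =>
    rw [pvFindA] at h ⊢
    cases hp : PySem.List.pyGet? parent i with
    | none => simp [hp] at h
    | some p =>
      simp only [hp] at h ⊢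
      by_cases hpi : p = i
      · simpa [hpi] using h
      · simp only [if_neg hpi] at h ⊢; exact ih _ h

theorem pvFindA_le_mono (parent : List Int) {f g : Nat} (hfg : f ≤ g) (i r : Int)
    (h : pvFindA parent f i = some r) : pvFindA parent g i = some r := by
  obtain ⟨d, rfl⟩ := Nat.exists_eq_add_of_le hfg
  induction d with
  | zero => simpa using h
  | succ d ih => simpa [← Nat.add_assoc] using pvFindA_mono parent (f + d) i r (ih (by omega))

theorem pvFindA_fix (parent : List Int) (f : Nat) (i r : Int)
    (h : pvFindA parent f i = some r) : PySem.List.pyGet? parent r = some r := by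
  induction f generalizing i with
  | zero => simp [pvFindA] at h
  | succ f ih =>
    rw [pvFindA] at h
    cases hp : PySem.List.pyGet? parent i with
    | none => simp [hp] at h
    | some p =>
      simp only [hp] at h
      by_cases hpi : p = i
      · obtain rfl : i = r := by simpa [hpi] using h
        rw [hp, hpi]
      · simp only [if_neg hpi] at h; exact ih _ h

-- pyGet? on a nonnegative in-range index, phrased through getD
theorem pvGet_some (xs : List Int) (i p : Int) (h0 : 0 ≤ i)
    (h : PySem.List.pyGet? xs i = some p) :
    i.toNat < xs.length ∧ p = xs.getD i.toNat 0 := by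
  rw [PySem.List.pyGet?_of_nonneg xs h0] at h
  rcases List.getElem?_eq_some_iff.mp h with ⟨hlt, he⟩
  exact ⟨hlt, by simp [List.getD, h]⟩

theorem pvGet_of_getD (xs : List Int) (j : Nat) (hj : j < xs.length) :
    PySem.List.pyGet? xs (j : Int) = some (xs.getD j 0) := by
  simp [PySem.List.pyGet?_natCast, List.getD, List.getElem?_eq_getElem hj]

-- a root other than the result's may be repointed without changing find
theorem pvFindA_set_avoid (parent : List Int) (a : Nat) (v : Int)
    (haroot : parent.getD a 0 = (a : Int))
    (hpos : ∀ j, j < parent.length → 0 ≤ parent.getD j 0)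
    (f : Nat) (i r : Int) (hi : 0 ≤ i)
    (h : pvFindA parent f i = some r) (hr : r ≠ (a : Int)) :
    pvFindA (parent.set a v) f i = some r := by
  induction f generalizing i with
  | zero => simp [pvFindA] at h
  | succ f ih =>
    rw [pvFindA] at h ⊢
    cases hp : PySem.List.pyGet? parent i with
    | none => simp [hp] at h
    | some p =>
      obtain ⟨hilt, hpd⟩ := pvGet_some parent i p hi hp
      have hia : i.toNat ≠ a := by
        intro hia
        by_cases hpi : p = i
        · simp only [hp, if_pos hpi] at h
          obtain rfl : i = r := by simpa using h
          apply hr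
          calc i = p := hpi.symm
            _ = parent.getD i.toNat 0 := hpd
            _ = parent.getD a 0 := by rw [hia]
            _ = (a : Int) := haroot
        · apply hpi
          rw [hpd, hia, haroot, ← hia, Int.toNat_of_nonneg hi]
      have hp' : PySem.List.pyGet? (parent.set a v) i = some p := by
        rw [PySem.List.pyGet?_of_nonneg _ hi, List.getElem?_set_ne (by omega),
          ← PySem.List.pyGet?_of_nonneg _ hi, hp]
      simp only [hp, hp'] at h ⊢
      by_cases hpi : p = i
      · simpa [hpi] using h
      · simp only [if_neg hpi] at h ⊢
        exact ih p (by rw [hpd]; exact hpos _ hilt) h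

-- repointing the found root a to another root pY redirects find to pY (one extra step)
theorem pvFindA_set_through (parent : List Int) (a : Nat) (pY : Int)
    (ha : a < parent.length) (haroot : parent.getD a 0 = (a : Int))
    (hY0 : 0 ≤ pY) (hYroot : parent.getD pY.toNat 0 = pY) (hYa : pY ≠ (a : Int))
    (hpos : ∀ j, j < parent.length → 0 ≤ parent.getD j 0)
    (f : Nat) (i : Int) (hi : 0 ≤ i)
    (h : pvFindA parent f i = some (a : Int)) :
    pvFindA (parent.set a pY) (f + 1) i = some pY := by
  induction f generalizing i with
  | zero => simp [pvFindA] at h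
  | succ f ih =>
    rw [pvFindA] at h
    cases hp : PySem.List.pyGet? parent i with
    | none => simp [hp] at h
    | some p =>
      obtain ⟨hilt, hpd⟩ := pvGet_some parent i p hi hp
      simp only [hp] at h
      by_cases hpi : p = i
      · obtain rfl : i = (a : Int) := by simpa [hpi] using h
        have hYne : pY.toNat ≠ a := fun hc => hYa (by rw [← hc, Int.toNat_of_nonneg hY0])
        have h1 : PySem.List.pyGet? (parent.set a pY) (a : Int) = some pY := by
          rw [PySem.List.pyGet?_natCast, List.getElem?_set_self ha]
        rw [pvFindA]
        simp only [h1, if_neg hYa]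
        rw [pvFindA]
        have h2 : PySem.List.pyGet? (parent.set a pY) pY = some pY := by
          have hYlt : pY.toNat < parent.length := by
            by_contra hc
            simp [List.getD_eq_getElem?_getD, List.getElem?_eq_none (by omega : parent.length ≤ pY.toNat)] at hYroot
            omega
          rw [PySem.List.pyGet?_of_nonneg _ hY0, List.getElem?_set_ne (by omega),
            List.getElem?_eq_getElem hYlt, ← List.getD_eq_getElem _ 0 hYlt, hYroot]
        simp [h2]
      · have hia : i.toNat ≠ a := by
          intro hc
          apply hpi
          rw [hpd, hc, haroot, ← hc, Int.toNat_of_nonneg hi]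
        have hp' : PySem.List.pyGet? (parent.set a pY) i = some p := by
          rw [PySem.List.pyGet?_of_nonneg _ hi, List.getElem?_set_ne (by omega),
            ← PySem.List.pyGet?_of_nonneg _ hi, hp]
        rw [pvFindA]
        simp only [hp', if_neg hpi]
        exact ih p (by rw [hpd]; exact hpos _ hilt) (by simpa [if_neg hpi] using h)

-- a negative Python index behaves like its wrapped nonnegative form, one extra step
theorem pvFindA_neg (parent : List Int) (x : Int) (hx0 : x < 0)
    (hx1 : -(parent.length : Int) ≤ x)
    (hpos : ∀ j, j < parent.length → 0 ≤ parent.getD j 0)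
    (f : Nat) (r : Int)
    (h : pvFindA parent f (x + parent.length) = some r) :
    pvFindA parent (f + 1) x = some r := by
  cases f with
  | zero => simp [pvFindA] at h
  | succ g =>
    rw [pvFindA] at h
    cases hp : PySem.List.pyGet? parent (x + parent.length) with
    | none => simp [hp] at h
    | some p =>
      have hxN : (0 : Int) ≤ x + parent.length := by omega
      obtain ⟨hlt, hpd⟩ := pvGet_some parent _ p hxN hp
      have hkey : PySem.List.pyGet? parent x = some p := by
        have hk0 : 0 < (-x).toNat := by omega
        have hk1 : (-x).toNat ≤ parent.length := by omega
        have hxe : x = -((-x).toNat : Int) := by omega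
        rw [hxe, PySem.List.pyGet?_neg_natCast parent _ hk0 hk1]
        rw [PySem.List.pyGet?_of_nonneg _ hxN] at hp
        have : parent.length - (-x).toNat = (x + parent.length).toNat := by omega
        rw [this]; exact hp
      have hp0 : 0 ≤ p := by rw [hpd]; exact hpos _ hlt
      rw [pvFindA]
      simp only [hkey, if_neg (by omega : ¬ p = x)]
      simp only [hp] at h
      by_cases hpe : p = x + parent.length
      · subst hpe
        obtain rfl : x + (parent.length : Int) = r := by simpa using h
        rw [pvFindA]
        simp [hp]
      · simp only [if_neg hpe] at h
        exact pvFindA_mono parent g p r h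

-- the wrapped (Python) index a possibly negative in-range index denotes
def pvNorm (N : Nat) (x : Int) : Nat := if 0 ≤ x then x.toNat else (x + N).toNat

-- under the invariant, A's find and B's lookup agree on every in-range index
theorem pvFind_rep (parent rep : List Int) (hInv : pvInv parent rep)
    (x : Int) (hx0 : -(parent.length : Int) ≤ x) (hx1 : x < (parent.length : Int)) :
    pvFindA parent (parent.length + 1) x = some (rep.getD (pvNorm parent.length x) 0) ∧
    PySem.List.pyGet? rep x = some (rep.getD (pvNorm parent.length x) 0) := by
  obtain ⟨hlen, hpp, hrp, S, hSmem, hScard, hfind⟩ := hInv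
  have hpos : ∀ j, j < parent.length → 0 ≤ parent.getD j 0 := fun j hj => (hpp j hj).1
  by_cases h0 : 0 ≤ x
  · have hxlt : x.toNat < parent.length := by omega
    have hfx := hfind x.toNat hxlt
    have hcast : ((x.toNat : Nat) : Int) = x := Int.toNat_of_nonneg h0
    constructor
    · rw [pvNorm, if_pos h0]
      refine pvFindA_le_mono parent (f := S.card + 1) (g := parent.length + 1) (by omega) x _ ?_
      rw [← hcast]; exact hfx
    · rw [pvNorm, if_pos h0, ← hcast]
      exact pvGet_of_getD rep x.toNat (by omega)
  · have hxn : x < 0 := by omega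
    have hjlt : (x + parent.length).toNat < parent.length := by omega
    have hfx := hfind (x + parent.length).toNat hjlt
    have hcast : (((x + parent.length).toNat : Nat) : Int) = x + parent.length := by omega
    constructor
    · rw [pvNorm, if_neg h0]
      have h1 : pvFindA parent (S.card + 1) (x + parent.length)
          = some (rep.getD (x + parent.length).toNat 0) := by rw [← hcast]; exact hfx
      have h2 := pvFindA_neg parent x hxn hx0 hpos (S.card + 1) _ h1
      exact pvFindA_le_mono parent (f := S.card + 1 + 1) (g := parent.length + 1) (by omega) x _ h2
    · rw [pvNorm, if_neg h0]
      have hk0 : 0 < (-x).toNat := by omega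
      have hk1 : (-x).toNat ≤ rep.length := by omega
      have hxe : x = -(((-x).toNat : Nat) : Int) := by omega
      have hget := PySem.List.pyGet?_neg_natCast rep (-x).toNat hk0 hk1
      rw [← hxe] at hget
      have he : rep.length - (-x).toNat = (x + parent.length).toNat := by omega
      rw [hget, he, List.getElem?_eq_getElem (by omega), List.getD_eq_getElem _ 0 (by omega)]

-- one union step preserves the invariant
theorem pvInv_step (parent rep : List Int) (hInv : pvInv parent rep)
    (jx jy : Nat) (hjx : jx < parent.length) (hjy : jy < parent.length)
    (hne : rep.getD jx 0 ≠ rep.getD jy 0) :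
    pvInv (parent.set (rep.getD jx 0).toNat (rep.getD jy 0))
          (rep.map fun v => if v = rep.getD jx 0 then rep.getD jy 0 else v) := by
  obtain ⟨hlen, hpp, hrp, S, hSmem, hScard, hfind⟩ := hInv
  have hpos : ∀ j, j < parent.length → 0 ≤ parent.getD j 0 := fun j hj => (hpp j hj).1
  set rx := rep.getD jx 0 with hrxdef
  set ry := rep.getD jy 0 with hrydef
  have hrxb := hrp jx (by omega)
  have hryb := hrp jy (by omega)
  obtain ⟨hrxlt, hrxroot'⟩ := pvGet_some parent rx rx hrxb.1 (pvFindA_fix parent _ _ _ (hfind jx hjx))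
  obtain ⟨hrylt, hryroot'⟩ := pvGet_some parent ry ry hryb.1 (pvFindA_fix parent _ _ _ (hfind jy hjy))
  have hrxroot : parent.getD rx.toNat 0 = ((rx.toNat : Nat) : Int) := by
    rw [← hrxroot', Int.toNat_of_nonneg hrxb.1]
  have hryroot : parent.getD ry.toNat 0 = ry := hryroot'.symm
  have hrxcast : ((rx.toNat : Nat) : Int) = rx := Int.toNat_of_nonneg hrxb.1
  have hrycast : ((ry.toNat : Nat) : Int) = ry := Int.toNat_of_nonneg hryb.1
  have htne : rx.toNat ≠ ry.toNat := fun hc => hne (by rw [← hrxcast, ← hrycast, hc])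
  have hlenset : (parent.set rx.toNat ry).length = parent.length := List.length_set ..
  have hgset : ∀ j, j < parent.length →
      (parent.set rx.toNat ry).getD j 0 = if j = rx.toNat then ry else parent.getD j 0 := by
    intro j hj
    have hj' : j < (parent.set rx.toNat ry).length := by omega
    rw [List.getD_eq_getElem _ 0 hj', List.getD_eq_getElem _ 0 hj]
    by_cases hc : j = rx.toNat
    · subst hc; simp [List.getElem_set_self]
    · simp only [List.getElem_set, if_neg (by omega : ¬ rx.toNat = j), if_neg hc]
  have hmap : ∀ j, j < rep.length →
      (rep.map fun v => if v = rx then ry else v).getD j 0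
        = if rep.getD j 0 = rx then ry else rep.getD j 0 := by
    intro j hj
    rw [List.getD_eq_getElem _ 0 (by simpa using hj), List.getElem_map,
      List.getD_eq_getElem _ 0 hj]
  refine ⟨by simpa using hlen, ?_, ?_, insert rx.toNat S, ?_, ?_, ?_⟩
  · intro j hj
    rw [hlenset] at hj
    rw [hlenset, hgset j hj]
    by_cases hc : j = rx.toNat
    · simp only [if_pos hc]; constructor <;> [exact hryb.1; omega]
    · simp only [if_neg hc]; exact hpp j hj
  · intro j hj
    simp only [List.length_map] at hj ⊢
    rw [hmap j hj]
    by_cases hc : rep.getD j 0 = rx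
    · simp only [if_pos hc]; exact hryb
    · simp only [if_neg hc]; exact hrp j hj
  · intro j hj
    rcases Finset.mem_insert.mp hj with hc | hc
    · subst hc
      refine ⟨by omega, ?_⟩
      rw [hgset _ hrxlt, if_pos rfl, hrxcast]
      exact fun hc => hne hc.symm
    · obtain ⟨hjl, hjr⟩ := hSmem j hc
      have hjrx : j ≠ rx.toNat := fun hcc => hjr (by rw [hcc, hrxroot])
      refine ⟨by omega, ?_⟩
      rw [hgset j hjl, if_neg hjrx]
      exact hjr
  · have hnotmem : rx.toNat ∉ S := fun hc => (hSmem _ hc).2 hrxroot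
    rw [Finset.card_insert_of_notMem hnotmem, hlenset]
    have hsub : insert rx.toNat S ⊆ (Finset.range parent.length).erase ry.toNat := by
      intro j hj
      rcases Finset.mem_insert.mp hj with hc | hc
      · subst hc
        exact Finset.mem_erase.mpr ⟨htne, Finset.mem_range.mpr hrxlt⟩
      · obtain ⟨hjl, hjr⟩ := hSmem j hc
        have : j ≠ ry.toNat := by
          intro hcc
          apply hjr
          rw [hcc, hryroot]
          exact hrycast.symm
        exact Finset.mem_erase.mpr ⟨this, Finset.mem_range.mpr hjl⟩
    have hcard := Finset.card_le_card hsub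
    rw [Finset.card_erase_of_mem (Finset.mem_range.mpr hrylt), Finset.card_range,
      Finset.card_insert_of_notMem hnotmem] at hcard
    omega
  · intro j hj
    rw [hlenset] at hj
    rw [Finset.card_insert_of_notMem (fun hc => (hSmem _ hc).2 hrxroot)]
    rw [hmap j (by omega)]
    by_cases hc : rep.getD j 0 = rx
    · simp only [if_pos hc]
      exact pvFindA_set_through parent rx.toNat ry hrxlt hrxroot hryb.1
        hryroot (by rw [hrxcast]; exact fun hcc => hne hcc.symm) hpos
        (S.card + 1) (j : Int) (Int.natCast_nonneg j) (by rw [hrxcast, ← hc]; exact hfind j hj)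
    · simp only [if_neg hc]
      exact pvFindA_mono _ _ _ _ (pvFindA_set_avoid parent rx.toNat ry hrxroot hpos (S.card + 1)
        (j : Int) (rep.getD j 0) (Int.natCast_nonneg j) (hfind j hj) (by rw [hrxcast]; exact hc))

-- the initial state satisfies the invariant
theorem pvInv_init (n : Int) (hn : 0 ≤ n) :
    pvInv (PySem.List.pyRange 0 (n + 1) 1) (PySem.List.pyRange 0 (n + 1) 1) := by
  have hNlen : (PySem.List.pyRange 0 (n + 1) 1 : List Int).length = (n + 1).toNat := by
    simp [PySem.List.length_pyRange_one]
  have hgetD : ∀ j, j < (PySem.List.pyRange 0 (n + 1) 1 : List Int).length →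
      (PySem.List.pyRange 0 (n + 1) 1 : List Int).getD j 0 = (j : Int) := by
    intro j hj
    rw [List.getD_eq_getElem _ 0 hj, PySem.List.getElem_pyRange_one]
    simp
  refine ⟨rfl, ?_, ?_, ∅, by simp, by simp only [Finset.card_empty]; omega, ?_⟩
  · intro j hj; rw [hgetD j hj]; constructor <;> omega
  · intro j hj; rw [hgetD j hj]; constructor <;> omega
  · intro j hj
    rw [Finset.card_empty]
    show pvFindA _ (0 + 1) _ = _
    rw [pvFindA, pvGet_of_getD _ j hj, hgetD j hj]
    simp

-- the two loops agree step by step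
theorem pvLoop_eq (edges : List (List Int)) : ∀ (parent rank rep : List Int),
    pvInv parent rep → rank.length = parent.length →
    (∀ e ∈ edges, e.length = 2 ∧ ∀ v ∈ e, -(parent.length : Int) ≤ v ∧ v < (parent.length : Int)) →
    pvLoopA parent rank edges = pvLoopB rep edges := by
  induction edges with
  | nil => intros; rfl
  | cons e rest ih =>
    intro parent rank rep hInv hrank hpre
    obtain ⟨he2, hev⟩ := hpre e (List.mem_cons_self ..)
    rcases e with _ | ⟨x, _ | ⟨y, _ | _⟩⟩ <;> simp at he2
    obtain ⟨hx0, hx1⟩ := hev x (by simp)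
    obtain ⟨hy0, hy1⟩ := hev y (by simp)
    obtain ⟨hfx, hgx⟩ := pvFind_rep parent rep hInv x hx0 hx1
    obtain ⟨hfy, hgy⟩ := pvFind_rep parent rep hInv y hy0 hy1
    have hlen : parent.length = rep.length := hInv.1
    have hjx : pvNorm parent.length x < parent.length := by unfold pvNorm; split <;> omega
    have hjy : pvNorm parent.length y < parent.length := by unfold pvNorm; split <;> omega
    obtain ⟨hrx0, hrx1⟩ : 0 ≤ rep.getD (pvNorm parent.length x) 0 ∧
        rep.getD (pvNorm parent.length x) 0 < (parent.length : Int) := by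
      have := hInv.2.2.1 (pvNorm parent.length x) (by rw [← hlen]; exact hjx)
      omega
    obtain ⟨hry0, hry1⟩ : 0 ≤ rep.getD (pvNorm parent.length y) 0 ∧
        rep.getD (pvNorm parent.length y) 0 < (parent.length : Int) := by
      have := hInv.2.2.1 (pvNorm parent.length y) (by rw [← hlen]; exact hjy)
      omega
    set rx := rep.getD (pvNorm parent.length x) 0 with hrxdef
    set ry := rep.getD (pvNorm parent.length y) 0 with hrydef
    rw [pvLoopA, pvLoopB, pvUnionA, hfx, hfy, hgx, hgy]
    by_cases hxy : rx = ry
    · simp [hxy]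
    · simp only [if_neg hxy]
      have hroot_y : PySem.List.pyGet? parent ry = some ry := pvFindA_fix parent _ _ _ hfy
      have hrxcast : ((rx.toNat : Nat) : Int) = rx := Int.toNat_of_nonneg hrx0
      have hrycast : ((ry.toNat : Nat) : Int) = ry := Int.toNat_of_nonneg hry0
      have hrankx : PySem.List.pyGet? rank rx = some (rank.getD rx.toNat 0) := by
        rw [← hrxcast]; exact pvGet_of_getD rank rx.toNat (by omega)
      have hranky : PySem.List.pyGet? rank ry = some (rank.getD ry.toNat 0) := by
        rw [← hrycast]; exact pvGet_of_getD rank ry.toNat (by omega)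
      have hset : PySem.List.pySet? parent rx ry = some (parent.set rx.toNat ry) := by
        rw [← hrxcast]; exact PySem.List.pySet?_natCast parent rx.toNat ry (by omega)
      simp only [hrankx, hranky, hroot_y, hset]
      have hInv' := pvInv_step parent rep hInv (pvNorm parent.length x)
        (pvNorm parent.length y) hjx hjy hxy
      have hpre' : ∀ e' ∈ rest, e'.length = 2 ∧
          ∀ v ∈ e', -(((parent.set rx.toNat ry).length : Int)) ≤ v ∧
            v < (((parent.set rx.toNat ry).length : Int)) := by
        intro e' he'
        simpa [List.length_set] using hpre e' (List.mem_cons_of_mem _ he')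
      by_cases hr : rank.getD ry.toNat 0 < rank.getD rx.toNat 0
      · simp only [if_pos hr]
        exact ih (parent.set rx.toNat ry) rank _ hInv' (by simpa [List.length_set] using hrank) hpre'
      · simp only [if_neg hr]
        have hsetr : PySem.List.pySet? rank ry (rank.getD ry.toNat 0 + rank.getD rx.toNat 0)
            = some (rank.set ry.toNat (rank.getD ry.toNat 0 + rank.getD rx.toNat 0)) := by
          rw [← hrycast]; exact PySem.List.pySet?_natCast rank ry.toNat _ (by omega)
        simp only [hsetr]
        exact ih (parent.set rx.toNat ry) _ _ hInv' (by simpa [List.length_set] using hrank) hpre'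

-- ===== VERDICT (by name: the statement is the Claim_ definition above) =====
theorem validTree_spec : Claim_equal_validTree := by
  intro n edges hdom hpre
  unfold Spec_validTree validTree validTree_alt
  by_cases hlen : PySem.List.len edges < n - 1
  · rw [if_pos hlen, if_pos hlen]
  · rw [if_neg hlen, if_neg hlen]
    replace hpre : ∀ e ∈ edges, e.length = 2 ∧ ∀ v ∈ e, -(n + 1) ≤ v ∧ v ≤ n := by
      rcases hpre with hpre | hpre
      · exact absurd (by rw [PySem.List.len_eq]; exact hpre) hlen
      · exact hpre
    cases edges with
    | nil => rfl
    | cons e rest =>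
      obtain ⟨he2, hev⟩ := hpre e (List.mem_cons_self ..)
      have hn : 0 ≤ n := by
        rcases e with _ | ⟨v, e'⟩
        · simp at he2
        · have := hev v (by simp); omega
      have hN : (((PySem.List.pyRange 0 (n + 1) 1 : List Int).length : Nat) : Int) = n + 1 := by
        rw [PySem.List.length_pyRange_one]; omega
      have heq := pvLoop_eq (e :: rest) (PySem.List.pyRange 0 (n + 1) 1)
        (PySem.List.pyRange 0 (n + 1) 1) (PySem.List.pyRange 0 (n + 1) 1)
        (pvInv_init n hn) rfl ?_
      · simp only [heq]
      · intro e' he'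
        obtain ⟨h2, hv⟩ := hpre e' he'
        refine ⟨h2, fun v hv' => ?_⟩
        have := hv v hv'
        rw [hN]
        omega
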